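-- pv_equiv track=rewrite | github.com/DragunWF/Competitive-Programming | CodeWars/python/7_kyu/correct_the_time_string.py | is_valid_time_format
-- ===== SOURCE A (Python) =====
-- def is_valid_time_format(t: str) -> bool:
--     values = t.split(":")
--     if len(values) != 3:
--         return False
--     for element in values:
--         if len(element) != 2 or not element.isdigit():
--             return False
--     return True
-- ===== SOURCE B (Python) =====
-- def is_valid_time_format(t: str) -> bool:
--     if len(t) != 8:
--         return False
--     return t[2] == ':' and t[5] == ':' and all(t[i].isdigit() for i in (0, 1, 3, 4, 6, 7))
-- ===== Notes on version B (the rewrite author's own statement) =====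
-- stated objective: idiomatic
-- what changed: Replaces splitting on the colon separator plus a loop over the pieces by a direct fixed-position check: length 8, colons at indices 2 and 5, digits at the six remaining positions.
import Mathlib
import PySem

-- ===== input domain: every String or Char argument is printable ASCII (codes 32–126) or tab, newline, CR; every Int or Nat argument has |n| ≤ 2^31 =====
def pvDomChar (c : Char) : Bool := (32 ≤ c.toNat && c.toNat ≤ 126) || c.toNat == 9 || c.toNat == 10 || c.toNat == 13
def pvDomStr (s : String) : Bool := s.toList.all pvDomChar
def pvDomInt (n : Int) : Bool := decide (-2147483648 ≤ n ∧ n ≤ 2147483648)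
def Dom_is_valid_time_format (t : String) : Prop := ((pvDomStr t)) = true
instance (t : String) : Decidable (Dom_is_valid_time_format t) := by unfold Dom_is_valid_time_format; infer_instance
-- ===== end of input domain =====

-- B replaces A's colon-split and loop over the pieces by a direct fixed-position check
-- (length 8, colons at indices 2 and 5, digits elsewhere); objective: idiomatic.

-- ===== PORT A =====
-- the for-loop of A: early return False on a bad element, True after the loop
def pvLoopA : List (List Char) → Bool
  | [] => true
  | e :: rest => if e.length != 2 || !PySem.Chars.strIsdigit e then false else pvLoopA rest

def is_valid_time_format (t : String) : Bool :=
  let values := PySem.Chars.splitOn t.toList [':']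
  if values.length != 3 then false else pvLoopA values

-- ===== PORT B =====
def is_valid_time_format_alt (t : String) : Bool :=
  match t.toList with
  | [h1, h2, c1, m1, m2, c2, s1, s2] =>
      c1 == ':' && c2 == ':' && [h1, h2, m1, m2, s1, s2].all PySem.Chars.isdigit
  | _ => false

-- ===== PRECONDITION & SPEC =====
def Spec_is_valid_time_format (t : String) (out : Bool) : Prop := out = is_valid_time_format_alt t
instance (t : String) (out : Bool) : Decidable (Spec_is_valid_time_format t out) := by unfold Spec_is_valid_time_format; infer_instance

-- ===== CLAIM (what is proved, stated in full; the proofs are below) =====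
def Claim_equal_is_valid_time_format : Prop := ∀ (t : String), Dom_is_valid_time_format t → Spec_is_valid_time_format t (is_valid_time_format t)

-- ===== LEMMAS AND PROOFS =====

-- a fuel-free rendering of PySem.Chars.splitOn for the separator [':']
def pvSplit (pre : List Char) : List Char → List (List Char)
  | [] => [pre]
  | c :: rest => if c = ':' then pre :: pvSplit [] rest else pvSplit (pre ++ [c]) rest

lemma pvGo_eq_pvSplit (cs : List Char) : ∀ (fuel : Nat) (cur : List Char) (acc : List (List Char)),
    cs.length ≤ fuel →
    PySem.Chars.splitOn.go [':'] fuel cs cur acc = acc.reverse ++ pvSplit cur.reverse cs := by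
  induction cs with
  | nil =>
      intro fuel cur acc _
      cases fuel <;> simp [PySem.Chars.splitOn.go, pvSplit]
  | cons c rest ih =>
      intro fuel cur acc hle
      cases fuel with
      | zero => simp at hle
      | succ fuel =>
        have hle' : rest.length ≤ fuel := by simpa using Nat.le_of_succ_le_succ hle
        by_cases hc : c = ':'
        · subst hc
          simp only [PySem.Chars.splitOn.go, List.isPrefixOf, Bool.and_true, beq_self_eq_true,
            if_true, List.length_cons, List.length_nil, List.drop_succ_cons, List.drop_zero]
          rw [ih fuel [] (cur.reverse :: acc) hle']
          simp [pvSplit]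
        · have hbe : ((':' == c && true)) = false := by simp [Ne.symm hc]
          simp only [PySem.Chars.splitOn.go, List.isPrefixOf, hbe, Bool.false_eq_true, if_false]
          rw [ih fuel (c :: cur) acc hle']
          simp [pvSplit, hc]

lemma splitOn_eq_pvSplit (cs : List Char) :
    PySem.Chars.splitOn cs [':'] = pvSplit [] cs := by
  have := pvGo_eq_pvSplit cs (cs.length + 1) [] [] (Nat.le_succ _)
  simpa [PySem.Chars.splitOn] using this

-- join with ':' — the inverse of pvSplit
def pvJoin : List (List Char) → List Char
  | [] => []
  | [p] => p
  | p :: ps => p ++ ':' :: pvJoin ps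

lemma pvSplit_ne_nil (cs : List Char) : ∀ pre, pvSplit pre cs ≠ [] := by
  induction cs with
  | nil => intro pre; simp [pvSplit]
  | cons c rest ih =>
      intro pre
      by_cases hc : c = ':'
      · subst hc; simp [pvSplit]
      · simp only [pvSplit, if_neg hc]; exact ih (pre ++ [c])

lemma pvJoin_cons (p : List Char) {ps : List (List Char)} (h : ps ≠ []) :
    pvJoin (p :: ps) = p ++ ':' :: pvJoin ps := by
  cases ps with
  | nil => exact absurd rfl h
  | cons q qs => rfl

lemma pvJoin_pvSplit (cs : List Char) : ∀ pre, pvJoin (pvSplit pre cs) = pre ++ cs := by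
  induction cs with
  | nil => intro pre; simp [pvSplit, pvJoin]
  | cons c rest ih =>
      intro pre
      by_cases hc : c = ':'
      · subst hc
        rw [show pvSplit pre (':' :: rest) = pre :: pvSplit [] rest from by simp [pvSplit]]
        rw [pvJoin_cons pre (pvSplit_ne_nil rest []), ih []]
        simp
      · simp only [pvSplit, if_neg hc]
        rw [ih (pre ++ [c])]
        simp

lemma isdigit_ne_colon {c : Char} (h : PySem.Chars.isdigit c = true) : c ≠ ':' := by
  simp [PySem.Chars.isdigit] at h
  intro hc; subst hc
  obtain ⟨h1, h2⟩ := h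
  exact absurd h2 (by decide)

-- a length-2 all-digit piece is literally two digit chars
lemma two_digits {p : List Char} (hl : p.length = 2) (hd : PySem.Chars.strIsdigit p = true) :
    ∃ a b, p = [a, b] ∧ PySem.Chars.isdigit a = true ∧ PySem.Chars.isdigit b = true := by
  match p, hl with
  | [a, b], _ =>
      simp [PySem.Chars.strIsdigit] at hd
      exact ⟨a, b, rfl, hd.1, hd.2⟩

-- backward direction: on the explicit 8-char colon-separated form, pvSplit computes the three pieces
lemma pvSplit_shape (h1 h2 m1 m2 s1 s2 : Char)
    (hh1 : h1 ≠ ':') (hh2 : h2 ≠ ':') (hm1 : m1 ≠ ':') (hm2 : m2 ≠ ':')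
    (hs1 : s1 ≠ ':') (hs2 : s2 ≠ ':') :
    pvSplit [] [h1, h2, ':', m1, m2, ':', s1, s2] = [[h1, h2], [m1, m2], [s1, s2]] := by
  simp [pvSplit, hh1, hh2, hm1, hm2, hs1, hs2]

lemma main_eq (t : String) : is_valid_time_format t = is_valid_time_format_alt t := by
  rw [Bool.eq_iff_iff]
  constructor
  · -- A = true → B = true
    intro hA
    unfold is_valid_time_format at hA
    rw [splitOn_eq_pvSplit] at hA
    dsimp only at hA
    split at hA
    · exact absurd hA (by simp)
    · rename_i hlen
      obtain ⟨p1, p2, p3, hps3⟩ := List.length_eq_three.mp (by simpa using hlen)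
      rw [hps3] at hA
      · -- unpack the loop
        unfold pvLoopA at hA
        split at hA
        · exact absurd hA (by simp)
        · rename_i hcond1
          unfold pvLoopA at hA
          split at hA
          · exact absurd hA (by simp)
          · rename_i hcond2
            unfold pvLoopA at hA
            split at hA
            · exact absurd hA (by simp)
            · rename_i hcond3
              simp only [Bool.or_eq_true, bne_iff_ne, ne_eq, Bool.not_eq_eq_eq_not,
                Bool.not_true, not_or, Bool.not_eq_false] at hcond1 hcond2 hcond3
              obtain ⟨hl1, hd1⟩ := hcond1
              obtain ⟨hl2, hd2⟩ := hcond2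
              obtain ⟨hl3, hd3⟩ := hcond3
              obtain ⟨a1, b1, rfl, ha1, hb1⟩ := two_digits (by omega) hd1
              obtain ⟨a2, b2, rfl, ha2, hb2⟩ := two_digits (by omega) hd2
              obtain ⟨a3, b3, rfl, ha3, hb3⟩ := two_digits (by omega) hd3
              have hjoin := pvJoin_pvSplit t.toList []
              rw [hps3] at hjoin
              simp only [pvJoin, List.nil_append] at hjoin
              unfold is_valid_time_format_alt
              rw [← hjoin]
              simp [List.all, ha1, hb1, ha2, hb2, ha3, hb3]
  · -- B = true → A = true
    intro hB
    unfold is_valid_time_format_alt at hB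
    split at hB
    · rename_i h1 h2 c1 m1 m2 c2 s1 s2 heq
      simp only [Bool.and_eq_true, beq_iff_eq, List.all_cons, List.all_nil, Bool.and_true] at hB
      obtain ⟨⟨hc1, hc2⟩, hd1, hd2, hd3, hd4, hd5, hd6⟩ := hB
      subst hc1; subst hc2
      unfold is_valid_time_format
      rw [splitOn_eq_pvSplit, heq,
        pvSplit_shape h1 h2 m1 m2 s1 s2 (isdigit_ne_colon hd1) (isdigit_ne_colon hd2)
          (isdigit_ne_colon hd3) (isdigit_ne_colon hd4) (isdigit_ne_colon hd5) (isdigit_ne_colon hd6)]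
      simp [pvLoopA, PySem.Chars.strIsdigit, hd1, hd2, hd3, hd4, hd5, hd6]
    · exact absurd hB (by simp)

-- ===== VERDICT (by name: the statement is the Claim_ definition above) =====
theorem is_valid_time_format_spec : Claim_equal_is_valid_time_format := by
  intro t _
  unfold Spec_is_valid_time_format
  exact main_eq t
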